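-- pv_equiv track=rewrite | github.com/wherby/code | contest/00000c443d154/d158/q1/t1.py | maxSumDistinctTriplet
-- ===== SOURCE A (Python) =====
-- from typing import List, Tuple, Optional
-- from collections import defaultdict,deque
--
-- def maxSumDistinctTriplet(x: List[int], y: List[int]) -> int:
--     n = len(x)
--     if len(set(x)) <3:
--         return -1
--     dic = defaultdict(int)
--     for i,a in enumerate(x):
--         dic[a] = max(dic[a],y[i])
--     vs = list(dic.values())
--     vs.sort(reverse=True)
--     return sum(vs[:3])
-- ===== SOURCE B (Python) =====
-- def maxSumDistinctTriplet(x, y):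
--     best = {}
--     for a, b in zip(x, y):
--         if a in best:
--             if b > best[a]:
--                 best[a] = b
--         elif b > 0:
--             best[a] = b
--         else:
--             best[a] = 0
--     if len(best) < 3:
--         return -1
--     t1 = t2 = t3 = 0
--     for v in best.values():
--         if v > t1:
--             t1, t2, t3 = v, t1, t2
--         elif v > t2:
--             t2, t3 = v, t2
--         elif v > t3:
--             t3 = v
--     return t1 + t2 + t3
-- ===== Notes on version B (the rewrite author's own statement) =====
-- stated objective: faster
-- what changed: B replaces A's build-dict-then-sort-all-group-maxima-and-take-3 by a zip-driven dict build plus a single linear pass that maintains the three largest values in three variables (a hand-written top-3 selection instead of a full descending sort); measured ~2.2x faster.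
import Mathlib
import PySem

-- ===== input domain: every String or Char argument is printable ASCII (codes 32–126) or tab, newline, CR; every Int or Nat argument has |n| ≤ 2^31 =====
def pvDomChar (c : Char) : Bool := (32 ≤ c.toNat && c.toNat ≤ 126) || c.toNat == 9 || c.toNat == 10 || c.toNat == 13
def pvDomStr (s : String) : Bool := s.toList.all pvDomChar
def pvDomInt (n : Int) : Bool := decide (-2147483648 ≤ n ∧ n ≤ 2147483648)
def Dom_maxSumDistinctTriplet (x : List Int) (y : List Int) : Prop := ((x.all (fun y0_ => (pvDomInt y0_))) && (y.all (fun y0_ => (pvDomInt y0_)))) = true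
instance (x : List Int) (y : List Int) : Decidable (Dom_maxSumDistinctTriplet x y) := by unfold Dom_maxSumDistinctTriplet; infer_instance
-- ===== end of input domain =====

-- B replaces A's sort-then-take-3 of the per-distinct-x maxima by a single-pass
-- three-variable top-3 scan over a dict built from zip(x, y) (objective: faster; a timing run measured B ~2x faster).

-- ===== PORT A =====
-- y[i] is ported as PySem.List.pyGetD y i 0: exact wherever i is in range, which Pre_ guarantees
-- (outside Pre_ the Python raises IndexError and nothing is claimed).
def maxSumDistinctTriplet (x : List Int) (y : List Int) : Int :=
  if (PySem.Set.ofList x).length < 3 then -1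
  else
    let dic := (PySem.List.enumerate x 0).foldl
      (fun d p => d.insert p.2 (max (d.getD p.2 0) (PySem.List.pyGetD y p.1 0)))
      PySem.Dict.empty
    let vs := PySem.List.sorted dic.values (fun v => v) true
    (PySem.List.slice vs none (some 3)).sum

-- ===== PORT B =====
def pvStep3 (t : Int × Int × Int) (v : Int) : Int × Int × Int :=
  if t.1 < v then (v, t.1, t.2.1)
  else if t.2.1 < v then (t.1, v, t.2.1)
  else if t.2.2 < v then (t.1, t.2.1, v)
  else t

def pvUpd (d : PySem.Dict Int Int) (p : Int × Int) : PySem.Dict Int Int :=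
  if d.contains p.1 then
    if d.getD p.1 0 < p.2 then d.insert p.1 p.2 else d
  else if 0 < p.2 then d.insert p.1 p.2
  else d.insert p.1 0

def maxSumDistinctTriplet_alt (x : List Int) (y : List Int) : Int :=
  let best := (x.zip y).foldl pvUpd PySem.Dict.empty
  if best.size < 3 then -1
  else
    let t := best.values.foldl pvStep3 (0, 0, 0)
    t.1 + t.2.1 + t.2.2

-- ===== PRECONDITION & SPEC =====
-- Pre_ excludes exactly the inputs where A raises IndexError: len(x) > len(y) while x has
-- at least 3 distinct values (then the loop reads y[i] for some i ≥ len(y)).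
def Pre_maxSumDistinctTriplet (x : List Int) (y : List Int) : Prop :=
  (PySem.Set.ofList x).length < 3 ∨ x.length ≤ y.length
instance (x : List Int) (y : List Int) : Decidable (Pre_maxSumDistinctTriplet x y) := by
  unfold Pre_maxSumDistinctTriplet; infer_instance

def pvWitness_maxSumDistinctTriplet : List Int × List Int := ([1, 2, 3], [4, 5, 6])

def Spec_maxSumDistinctTriplet (x : List Int) (y : List Int) (out : Int) : Prop := out = maxSumDistinctTriplet_alt x y
instance (x : List Int) (y : List Int) (out : Int) : Decidable (Spec_maxSumDistinctTriplet x y out) := by unfold Spec_maxSumDistinctTriplet; infer_instance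

-- ===== CLAIM (what is proved, stated in full; the proofs are below) =====
def Claim_equal_maxSumDistinctTriplet : Prop := ∀ (x : List Int) (y : List Int), Dom_maxSumDistinctTriplet x y → Pre_maxSumDistinctTriplet x y → Spec_maxSumDistinctTriplet x y (maxSumDistinctTriplet x y)

-- ===== LEMMAS AND PROOFS =====

-- the common per-pair dict update both loops amount to
def pvF (d : PySem.Dict Int Int) (p : Int × Int) : PySem.Dict Int Int :=
  d.insert p.1 (max (d.getD p.1 0) p.2)

def pvSortD (l : List Int) : List Int := PySem.List.sorted l (fun v => v) true

-- ---- sorted-descending toolkit ----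

theorem pvSortD_pairwise (l : List Int) : (pvSortD l).Pairwise (· ≥ ·) := by
  simpa [pvSortD] using PySem.List.sorted_pairwise_rev l (fun v : Int => v)

theorem pvSortD_eq (l s : List Int) (hp : s.Perm l) (hs : s.Pairwise (· ≥ ·)) :
    pvSortD l = s := by
  refine PySem.List.eq_of_perm_of_pairwise_le_of_injective (fun v : Int => -v) neg_injective
    ((PySem.List.sorted_perm l (fun v : Int => v) true).trans hp.symm) ?_ ?_
  · exact (pvSortD_pairwise l).imp (fun h => by dsimp only; omega)
  · exact hs.imp (fun h => by dsimp only; omega)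

theorem pvSortD_congr (l₁ l₂ : List Int) (h : l₁.Perm l₂) : pvSortD l₁ = pvSortD l₂ := by
  refine pvSortD_eq l₁ (pvSortD l₂) ?_ (pvSortD_pairwise l₂)
  exact (PySem.List.sorted_perm l₂ (fun v : Int => v) true).trans h.symm

theorem pvSortD_cons (v : Int) (l : List Int) :
    pvSortD (v :: l) = List.orderedInsert (· ≥ ·) v (pvSortD l) := by
  refine pvSortD_eq _ _ ?_ ?_
  · exact (List.perm_orderedInsert _ v _).trans
      ((PySem.List.sorted_perm l (fun v : Int => v) true).cons v)
  · exact List.Pairwise.orderedInsert v _ (pvSortD_pairwise l)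

theorem pvTake_replicate (n : Nat) (s : List Int) (d : Int)
    (hs : s.Pairwise (· ≥ ·)) (hub : ∀ z ∈ s, z ≤ d)
    (hc : n ≤ s.countP (fun z => decide (d ≤ z))) :
    s.take n = List.replicate n d := by
  induction s generalizing n with
  | nil =>
    simp only [List.countP_nil, Nat.le_zero] at hc
    subst hc; simp
  | cons b t ih =>
    cases n with
    | zero => simp
    | succ m =>
      have hbd : b ≤ d := hub b (by simp)
      have hdb : d ≤ b := by
        by_contra hlt
        rw [not_le] at hlt
        have : (b :: t).countP (fun z => decide (d ≤ z)) = 0 := by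
          rw [List.countP_eq_zero]
          intro z hz
          have : z ≤ b := by
            rcases List.mem_cons.mp hz with h | h
            · omega
            · exact (List.pairwise_cons.mp hs).1 z h
          simp; omega
        omega
      have hbd' : b = d := le_antisymm hbd hdb
      subst hbd'
      have hct : m ≤ t.countP (fun z => decide (b ≤ z)) := by
        rw [List.countP_cons] at hc
        simp at hc ⊢
        omega
      simp only [List.take_succ_cons, List.replicate_succ]
      rw [ih m (List.pairwise_cons.mp hs).2 (fun z hz => hub z (by simp [hz])) hct]

theorem pvTake_orderedInsert (n : Nat) (s : List Int) (d : Int)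
    (hs : s.Pairwise (· ≥ ·)) (hc : n ≤ s.countP (fun z => decide (d ≤ z))) :
    (List.orderedInsert (· ≥ ·) d s).take n = s.take n := by
  induction s generalizing n with
  | nil =>
    simp only [List.countP_nil, Nat.le_zero] at hc
    subst hc; simp
  | cons b t ih =>
    by_cases hdb : d ≥ b
    · -- inserted in front: everything in the first n places equals d
      rw [List.orderedInsert, if_pos hdb]
      have hub : ∀ z ∈ b :: t, z ≤ d := by
        intro z hz
        rcases List.mem_cons.mp hz with h | h
        · omega
        · have := (List.pairwise_cons.mp hs).1 z h; omega
      have h1 : (b :: t).take n = List.replicate n d :=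
        pvTake_replicate n _ d hs hub hc
      have h2 : (d :: b :: t).take n = List.replicate n d := by
        refine pvTake_replicate n _ d ?_ ?_ ?_
        · refine List.pairwise_cons.mpr ⟨?_, hs⟩
          intro z hz
          exact hub z hz
        · intro z hz
          rcases List.mem_cons.mp hz with h | h
          · omega
          · exact hub z h
        · rw [List.countP_cons]
          simp
          omega
      rw [h1, h2]
    · rw [List.orderedInsert, if_neg hdb]
      cases n with
      | zero => simp
      | succ m =>
        have hct : m ≤ t.countP (fun z => decide (d ≤ z)) := by
          have hdble : (decide (d ≤ b)) = true := by simp; omega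
          rw [List.countP_cons, hdble] at hc
          simp at hc
          omega
        simp only [List.take_succ_cons]
        rw [ih m (List.pairwise_cons.mp hs).2 hct]

theorem pvCountP_sortD (l : List Int) (p : Int → Bool) :
    (pvSortD l).countP p = l.countP p :=
  (PySem.List.sorted_perm l (fun v : Int => v) true).countP_eq p

-- dropping an element that is below three elements of the tail block keeps take 3 of the sort
theorem pvDropMin (l : List Int) (a b c d : Int) (hba : b ≤ a) (hcb : c ≤ b) (hdc : d ≤ c) :
    (pvSortD (d :: (l ++ [a, b, c]))).take 3 = (pvSortD (l ++ [a, b, c])).take 3 := by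
  rw [pvSortD_cons]
  refine pvTake_orderedInsert 3 _ d (pvSortD_pairwise _) ?_
  rw [pvCountP_sortD, List.countP_append]
  have h1 : d ≤ a := by omega
  have h2 : d ≤ b := by omega
  have : List.countP (fun z => decide (d ≤ z)) [a, b, c] = 3 := by
    simp [h1, h2, hdc]
  omega

-- the three-variable scan computes take 3 of the descending sort
theorem pvStep3_main (l : List Int) (a b c : Int) (hba : b ≤ a) (hcb : c ≤ b) :
    (pvSortD (l ++ [a, b, c])).take 3 =
      [(l.foldl pvStep3 (a, b, c)).1, (l.foldl pvStep3 (a, b, c)).2.1,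
        (l.foldl pvStep3 (a, b, c)).2.2] := by
  induction l generalizing a b c with
  | nil =>
    have : pvSortD [a, b, c] = [a, b, c] := by
      refine PySem.List.sorted_rev_eq_self_of_pairwise _ _ ?_
      refine List.pairwise_cons.mpr ⟨?_, List.pairwise_cons.mpr ⟨?_, List.pairwise_singleton _ _⟩⟩
      · intro z hz; simp at hz; omega
      · intro z hz; simp at hz; omega
    simp [this]
  | cons v l ih =>
    -- four cases of pvStep3
    by_cases h1 : a < v
    · have hstep : pvStep3 (a, b, c) v = (v, a, b) := by simp [pvStep3, h1]
      have hp : ((v :: l) ++ [a, b, c]).Perm (c :: (l ++ [v, a, b])) := by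
        rw [List.perm_iff_count]
        intro z
        simp [List.count_cons, List.count_append]
        omega
      calc (pvSortD ((v :: l) ++ [a, b, c])).take 3
          = (pvSortD (c :: (l ++ [v, a, b]))).take 3 := by rw [pvSortD_congr _ _ hp]
        _ = (pvSortD (l ++ [v, a, b])).take 3 := pvDropMin l v a b c (by omega) hba hcb
        _ = _ := by rw [ih v a b (by omega) hba]; simp [hstep]
    · by_cases h2 : b < v
      · have hstep : pvStep3 (a, b, c) v = (a, v, b) := by simp [pvStep3, h1, h2]
        have hp : ((v :: l) ++ [a, b, c]).Perm (c :: (l ++ [a, v, b])) := by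
          rw [List.perm_iff_count]
          intro z
          simp [List.count_cons, List.count_append]
          omega
        calc (pvSortD ((v :: l) ++ [a, b, c])).take 3
            = (pvSortD (c :: (l ++ [a, v, b]))).take 3 := by rw [pvSortD_congr _ _ hp]
          _ = (pvSortD (l ++ [a, v, b])).take 3 := pvDropMin l a v b c (by omega) (by omega) hcb
          _ = _ := by rw [ih a v b (by omega) (by omega)]; simp [hstep]
      · by_cases h3 : c < v
        · have hstep : pvStep3 (a, b, c) v = (a, b, v) := by simp [pvStep3, h1, h2, h3]
          have hp : ((v :: l) ++ [a, b, c]).Perm (c :: (l ++ [a, b, v])) := by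
            rw [List.perm_iff_count]
            intro z
            simp [List.count_cons, List.count_append]
            omega
          calc (pvSortD ((v :: l) ++ [a, b, c])).take 3
              = (pvSortD (c :: (l ++ [a, b, v]))).take 3 := by rw [pvSortD_congr _ _ hp]
            _ = (pvSortD (l ++ [a, b, v])).take 3 := pvDropMin l a b v c hba (by omega) (by omega)
            _ = _ := by rw [ih a b v hba (by omega)]; simp [hstep]
        · have hstep : pvStep3 (a, b, c) v = (a, b, c) := by simp [pvStep3, h1, h2, h3]
          have hp : ((v :: l) ++ [a, b, c]).Perm (v :: (l ++ [a, b, c])) := by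
            simp
          calc (pvSortD ((v :: l) ++ [a, b, c])).take 3
              = (pvSortD (v :: (l ++ [a, b, c]))).take 3 := by rw [pvSortD_congr _ _ hp]
            _ = (pvSortD (l ++ [a, b, c])).take 3 := pvDropMin l a b c v hba hcb (by omega)
            _ = _ := by rw [ih a b c hba hcb]; simp [hstep]

-- padding three zeros does not change take 3 when the list has ≥ 3 nonnegative elements
theorem pvZeros (vs : List Int) (hlen : 3 ≤ vs.length) (hnn : ∀ v ∈ vs, 0 ≤ v) :
    (pvSortD (vs ++ [0, 0, 0])).take 3 = (pvSortD vs).take 3 := by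
  have hcount : 3 ≤ vs.countP (fun z => decide ((0 : Int) ≤ z)) := by
    have : vs.countP (fun z => decide ((0 : Int) ≤ z)) = vs.length :=
      List.countP_eq_length.mpr (fun a ha => by simp [hnn a ha])
    omega
  have hp : (vs ++ [0, 0, 0]).Perm (0 :: (0 :: (0 :: vs))) := by
    rw [List.perm_iff_count]
    intro z
    simp [List.count_cons, List.count_append]
    omega
  rw [pvSortD_congr _ _ hp]
  have step : ∀ w : List Int, 3 ≤ w.countP (fun z => decide ((0 : Int) ≤ z)) →
      (pvSortD (0 :: w)).take 3 = (pvSortD w).take 3 := by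
    intro w hw
    rw [pvSortD_cons]
    refine pvTake_orderedInsert 3 _ 0 (pvSortD_pairwise _) ?_
    rw [pvCountP_sortD]; omega
  have c1 : 3 ≤ (0 :: vs).countP (fun z => decide ((0 : Int) ≤ z)) := by
    rw [List.countP_cons]; omega
  have c2 : 3 ≤ (0 :: 0 :: vs).countP (fun z => decide ((0 : Int) ≤ z)) := by
    rw [List.countP_cons, List.countP_cons]; omega
  rw [step _ c2, step _ c1, step _ hcount]

-- ---- dict toolkit ----

theorem pvContains_eq (d : PySem.Dict Int Int) (k : Int) :
    d.contains k = PySem.Set.contains d.keys k := by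
  rw [Bool.eq_iff_iff, PySem.Dict.contains_iff_mem_keys]
  simp [PySem.Set.contains]

theorem pvKeys_insert (d : PySem.Dict Int Int) (k : Int) (v : Int) :
    (d.insert k v).keys = PySem.Set.add d.keys k := by
  have hsc : PySem.Set.contains d.keys k = d.contains k := (pvContains_eq d k).symm
  unfold PySem.Set.add
  rw [hsc]
  by_cases hc : d.contains k
  · rw [if_pos hc]
    simp only [PySem.Dict.insert, hc, if_pos]
    show List.map Prod.fst (List.map _ d.items) = List.map Prod.fst d.items
    rw [List.map_map]
    refine List.map_congr_left ?_
    intro p _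
    by_cases hpk : p.1 = k
    · simp [hpk]
    · simp [hpk]
  · rw [if_neg hc]
    simp only [PySem.Dict.insert, hc, if_neg, Bool.false_eq_true, not_false_iff]
    show List.map Prod.fst (d.items ++ [(k, v)]) = List.map Prod.fst d.items ++ [k]
    simp

theorem pvKeys_foldl_pvF (l : List (Int × Int)) (d : PySem.Dict Int Int) :
    (l.foldl pvF d).keys = l.foldl (fun s p => PySem.Set.add s p.1) d.keys := by
  induction l generalizing d with
  | nil => rfl
  | cons p l ih => simp only [List.foldl_cons, ih, pvF, pvKeys_insert]

theorem pvKeys_foldl_ofList (l : List (Int × Int)) :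
    ((l.foldl pvF PySem.Dict.empty).keys) = PySem.Set.ofList (l.map Prod.fst) := by
  rw [pvKeys_foldl_pvF, PySem.Set.ofList_eq_foldl, List.foldl_map]
  rfl

-- a successful lookup is one of the stored values
theorem pvGet?_mem_values (d : PySem.Dict Int Int) (k w : Int) (h : d.get? k = some w) :
    w ∈ d.values := by
  simp only [PySem.Dict.get?, Option.map_eq_some_iff] at h
  obtain ⟨p, hp, hw⟩ := h
  have := List.mem_of_find?_eq_some hp
  simp only [PySem.Dict.values, List.mem_map]
  exact ⟨p, this, hw⟩

theorem pvValues_nonneg (l : List (Int × Int)) (d : PySem.Dict Int Int)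
    (hd : ∀ v ∈ d.values, 0 ≤ v) : ∀ v ∈ (l.foldl pvF d).values, 0 ≤ v := by
  induction l generalizing d with
  | nil => exact hd
  | cons p l ih =>
    refine ih (pvF d p) ?_
    intro v hv
    have hnew : 0 ≤ max (d.getD p.1 0) p.2 := by
      cases hg : d.get? p.1 with
      | none =>
        have h0 : d.getD p.1 0 = 0 := by simp [PySem.Dict.getD, hg]
        rw [h0]
        exact le_max_left 0 p.2
      | some w =>
        have hw := hd w (pvGet?_mem_values d p.1 w hg)
        have h0 : d.getD p.1 0 = w := by simp [PySem.Dict.getD, hg]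
        rw [h0]
        exact le_trans hw (le_max_left _ _)
    have hmem : v = max (d.getD p.1 0) p.2 ∨ v ∈ d.values := by
      simp only [pvF, PySem.Dict.insert] at hv
      by_cases hc : d.contains p.1
      · rw [if_pos hc] at hv
        simp only [PySem.Dict.values, List.map_map] at hv
        rw [List.mem_map] at hv
        obtain ⟨q, hq, hqv⟩ := hv
        simp only [Function.comp_apply] at hqv
        by_cases hqk : (q.1 == p.1) = true
        · left
          rw [if_pos hqk] at hqv
          simpa using hqv.symm
        · right
          rw [if_neg hqk] at hqv
          simp only [PySem.Dict.values]
          rw [List.mem_map]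
          exact ⟨q, hq, hqv⟩
      · rw [if_neg hc] at hv
        simp only [PySem.Dict.values, List.map_append, List.mem_append, List.map_cons,
          List.map_nil, List.mem_cons, List.not_mem_nil, or_false] at hv
        rcases hv with h | h
        · right; exact h
        · left; exact h
    rcases hmem with h | h
    · rw [h]; exact hnew
    · exact hd v h

-- replacing the matched entry by (k, looked-up value) is the identity on a nodup-key list
theorem pvMapReplace (ps : List (Int × Int)) (k dflt : Int)
    (hnd : (ps.map Prod.fst).Nodup) (hc : (PySem.Dict.mk ps).contains k = true) :
    ps.map (fun p => if p.1 == k then (k, (PySem.Dict.mk ps).getD k dflt) else p) = ps := by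
  induction ps with
  | nil => simp [PySem.Dict.contains] at hc
  | cons q qs ih =>
    by_cases hq : q.1 == k
    · have hqk : q.1 = k := eq_of_beq hq
      have hget : (PySem.Dict.mk (q :: qs)).getD k dflt = q.2 := by
        simp [PySem.Dict.getD, PySem.Dict.get?, List.find?, hq]
      have hnotin : ∀ p ∈ qs, (p.1 == k) = false := by
        intro p hp
        have hq1 : q.1 ∉ qs.map Prod.fst := by
          simp only [List.map_cons, List.nodup_cons] at hnd
          exact hnd.1
        simp only [beq_eq_false_iff_ne, ne_eq]
        intro hpk
        exact hq1 (List.mem_map.mpr ⟨p, hp, by rw [hpk, ← hqk]⟩)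
      rw [List.map_cons, hget, if_pos hq]
      congr 1
      · rw [← hqk]
      · conv_rhs => rw [← List.map_id qs]
        refine List.map_congr_left ?_
        intro p hp
        simp [hnotin p hp]
    · have hc' : (PySem.Dict.mk qs).contains k = true := by
        simp [PySem.Dict.contains] at hc ⊢
        rcases hc with h | h
        · exact absurd h (by simpa using hq)
        · exact h
      have hnd' : (qs.map Prod.fst).Nodup := by
        simp only [List.map_cons, List.nodup_cons] at hnd
        exact hnd.2
      have hget : (PySem.Dict.mk (q :: qs)).getD k dflt = (PySem.Dict.mk qs).getD k dflt := by
        simp [PySem.Dict.getD, PySem.Dict.get?, List.find?, hq]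
      rw [List.map_cons, if_neg (by simpa using hq), hget]
      rw [ih hnd' hc']

-- re-inserting the looked-up value at an existing key changes nothing
theorem pvInsert_getD_self (d : PySem.Dict Int Int) (k dflt : Int)
    (hnd : d.keys.Nodup) (hc : d.contains k = true) :
    d.insert k (d.getD k dflt) = d := by
  apply PySem.Dict.ext
  simp only [PySem.Dict.insert, hc, if_pos]
  exact pvMapReplace d.items k dflt hnd hc

-- B's guarded update is the canonical max-update on nodup dicts
theorem pvUpd_eq_pvF (d : PySem.Dict Int Int) (p : Int × Int) (hnd : d.keys.Nodup) :
    pvUpd d p = pvF d p := by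
  unfold pvUpd pvF
  by_cases hc : d.contains p.1
  · simp only [hc, if_pos]
    by_cases hlt : d.getD p.1 0 < p.2
    · rw [if_pos hlt, max_eq_right (le_of_lt hlt)]
    · rw [if_neg hlt, max_eq_left (le_of_not_gt hlt)]
      exact (pvInsert_getD_self d p.1 0 hnd hc).symm
  · simp only [hc, if_neg, Bool.false_eq_true, not_false_iff]
    have hg : d.getD p.1 0 = 0 := by
      unfold PySem.Dict.getD
      cases hgg : d.get? p.1 with
      | none => simp
      | some w =>
        exfalso
        simp only [PySem.Dict.get?, Option.map_eq_some_iff] at hgg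
        obtain ⟨q, hq, _⟩ := hgg
        apply hc
        have hfq := List.find?_some hq
        show List.any d.items (fun r => r.1 == p.1) = true
        exact List.any_eq_true.mpr ⟨q, List.mem_of_find?_eq_some hq, hfq⟩
    rw [hg]
    by_cases h0 : 0 < p.2
    · rw [if_pos h0, max_eq_right (le_of_lt h0)]
    · rw [if_neg h0, max_eq_left (le_of_not_gt h0)]

theorem pvFold_upd_eq_F (l : List (Int × Int)) (d : PySem.Dict Int Int) (hnd : d.keys.Nodup) :
    l.foldl pvUpd d = l.foldl pvF d := by
  induction l generalizing d with
  | nil => rfl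
  | cons p l ih =>
    simp only [List.foldl_cons]
    rw [pvUpd_eq_pvF d p hnd, ih (pvF d p) ?_]
    have := pvKeys_insert d p.1 (max (d.getD p.1 0) p.2)
    rw [pvF, this]
    exact PySem.Set.nodup_add _ _ hnd

-- A's index-based loop is B's zip loop when y is long enough
theorem pvEnum_eq_zip (x y : List Int) (n : Nat) (d : PySem.Dict Int Int)
    (h : x.length + n ≤ y.length) :
    (PySem.List.enumerate x (n : Int)).foldl
        (fun d p => d.insert p.2 (max (d.getD p.2 0) (PySem.List.pyGetD y p.1 0))) d
      = (x.zip (y.drop n)).foldl pvF d := by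
  induction x generalizing n d with
  | nil => simp [PySem.List.enumerate]
  | cons a xt ih =>
    have hn : n < y.length := by simp at h; omega
    rw [PySem.List.enumerate_cons]
    have hdrop : y.drop n = y[n] :: y.drop (n + 1) := List.drop_eq_getElem_cons hn
    have hget : PySem.List.pyGetD y (n : Int) 0 = y[n] := by
      rw [PySem.List.pyGetD_natCast]
      simp [List.getD_eq_getElem?_getD, hn]
    simp only [List.foldl_cons, hdrop, List.zip_cons_cons]
    have : ((n : Int) + 1) = ((n + 1 : Nat) : Int) := by push_cast; ring
    rw [hget, this, ih (n + 1) _ (by simp at h ⊢; omega)]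
    rfl

-- take-y.length view of zip's first components (no length hypothesis)
theorem pvMap_fst_zip (x y : List Int) : (x.zip y).map Prod.fst = x.take y.length := by
  induction x generalizing y with
  | nil => simp
  | cons a xt ih =>
    cases y with
    | nil => simp
    | cons b yt => simp [ih yt]

theorem pvSet_length_le_foldl (t : List Int) (s : PySem.Set Int) :
    s.length ≤ (t.foldl PySem.Set.add s).length := by
  induction t generalizing s with
  | nil => exact le_refl _
  | cons a t ih =>
    refine le_trans ?_ (ih (s.add a))
    unfold PySem.Set.add
    split
    · exact le_refl _
    · simp

theorem pvSet_take_le (x : List Int) (m : Nat) :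
    (PySem.Set.ofList (x.take m)).length ≤ (PySem.Set.ofList x).length := by
  conv_rhs => rw [← List.take_append_drop m x]
  rw [PySem.Set.ofList_eq_foldl, PySem.Set.ofList_eq_foldl, List.foldl_append]
  exact pvSet_length_le_foldl _ _

-- ===== VERDICT (by name: the statement is the Claim_ definition above) =====
theorem maxSumDistinctTriplet_spec : Claim_equal_maxSumDistinctTriplet := by
  intro x y _ hpre
  unfold Spec_maxSumDistinctTriplet maxSumDistinctTriplet maxSumDistinctTriplet_alt
  by_cases hlt : (PySem.Set.ofList x).length < 3
  · -- both return -1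
    rw [if_pos hlt]
    have hsize : ((x.zip y).foldl pvUpd PySem.Dict.empty).size < 3 := by
      rw [pvFold_upd_eq_F _ _ (by simp [PySem.Dict.empty, PySem.Dict.keys])]
      have : ((x.zip y).foldl pvF PySem.Dict.empty).size
          = ((x.zip y).foldl pvF PySem.Dict.empty).keys.length := by
        simp [PySem.Dict.size, PySem.Dict.keys]
      rw [this, pvKeys_foldl_ofList, pvMap_fst_zip]
      have := pvSet_take_le x y.length
      omega
    simp only [hsize, if_pos]
  · rw [if_neg hlt]
    have hxy : x.length ≤ y.length := by
      rcases hpre with h | h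
      · exact absurd h hlt
      · exact h
    -- the two dicts coincide
    have hdict :
        (PySem.List.enumerate x 0).foldl
            (fun d p => d.insert p.2 (max (d.getD p.2 0) (PySem.List.pyGetD y p.1 0)))
            PySem.Dict.empty
          = (x.zip y).foldl pvUpd PySem.Dict.empty := by
      rw [pvFold_upd_eq_F _ _ (by simp [PySem.Dict.empty, PySem.Dict.keys])]
      have he := pvEnum_eq_zip x y 0 PySem.Dict.empty (by omega)
      simp only [Nat.cast_zero, List.drop_zero] at he
      exact he
    set dic := (x.zip y).foldl pvUpd PySem.Dict.empty with hdic
    rw [hdict]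
    have hkeys : dic.keys = PySem.Set.ofList x := by
      rw [hdic, pvFold_upd_eq_F _ _ (by simp [PySem.Dict.empty, PySem.Dict.keys]),
        pvKeys_foldl_ofList, List.map_fst_zip hxy]
    have hsize : ¬ dic.size < 3 := by
      have : dic.size = dic.keys.length := by simp [PySem.Dict.size, PySem.Dict.keys]
      rw [this, hkeys]; omega
    rw [if_neg hsize]
    -- values: nonnegative and at least three of them
    have hnn : ∀ v ∈ dic.values, 0 ≤ v := by
      rw [hdic, pvFold_upd_eq_F _ _ (by simp [PySem.Dict.empty, PySem.Dict.keys])]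
      exact pvValues_nonneg _ _ (by simp [PySem.Dict.empty, PySem.Dict.values])
    have hvlen : 3 ≤ dic.values.length := by
      have h1 : dic.values.length = dic.size := by simp [PySem.Dict.size, PySem.Dict.values]
      omega
    -- the sorted-slice sum equals the top-3 scan sum
    have hmain := pvStep3_main dic.values 0 0 0 (le_refl 0) (le_refl 0)
    rw [pvZeros dic.values hvlen hnn] at hmain
    dsimp only
    rw [PySem.List.slice_to _ (by omega : (0:Int) ≤ 3)]
    have h3 : ((3 : Int)).toNat = 3 := rfl
    rw [h3]
    show (List.take 3 (pvSortD dic.values)).sum = _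
    rw [hmain]
    simp [List.sum_cons]
    ring
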